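-- pv_equiv track=rewrite | github.com/tianrui-qi/CM2 | src/crop.py | spans_from_cuts
-- ===== SOURCE A (Python) =====
-- def spans_from_cuts(
--     length: int,
--     cuts: list[int],
--     min_patch_size: int,
-- ) -> list[tuple[int, int]]:
--     boundaries = [0] + sorted(set(c for c in cuts if 0 < c < length)) + [length]
--     if len(boundaries) <= 2:
--         return [(0, length)] if length > 0 else []
--
--     # Do not drop pixels: merge tiny spans into adjacent spans by removing cuts.
--     # Quadrant seams are represented by boundaries 0 and length and are never removed.
--     while True:
--         lengths = [boundaries[i + 1] - boundaries[i] for i in range(len(boundaries) - 1)]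
--         small_idx = next(
--             (i for i, span_len in enumerate(lengths) if span_len < min_patch_size),
--             None,
--         )
--         if small_idx is None:
--             break
--         if len(boundaries) <= 2:
--             break
--
--         can_merge_left = small_idx > 0
--         can_merge_right = (small_idx + 1) < (len(boundaries) - 1)
--         if not can_merge_left and not can_merge_right:
--             break
--
--         if can_merge_left and can_merge_right:
--             left_len = boundaries[small_idx] - boundaries[small_idx - 1]
--             right_len = boundaries[small_idx + 2] - boundaries[small_idx + 1]
--             # Both sides are internal seams: remove the side that yields the
--             # smaller merged span (merge with the smaller neighbor).
--             merge_left = left_len <= right_len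
--         else:
--             # Edge tiny span: only the internal seam can be removed; keep
--             # quadrant seam at boundary 0/length untouched.
--             merge_left = can_merge_left
--
--         if merge_left:
--             # Remove left boundary: merge previous span and small span.
--             del boundaries[small_idx]
--         else:
--             # Remove right boundary: merge small span and next span.
--             del boundaries[small_idx + 1]
--
--     spans: list[tuple[int, int]] = []
--     for i in range(len(boundaries) - 1):
--         s = boundaries[i]
--         e = boundaries[i + 1]
--         if e > s:
--             spans.append((s, e))
--     return spans
-- ===== SOURCE B (Python) =====
-- def spans_from_cuts(
--     length: int,
--     cuts: list[int],
--     min_patch_size: int,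
-- ) -> list[tuple[int, int]]:
--     bs = [0] + sorted({c for c in cuts if 0 < c < length}) + [length]
--     if len(bs) <= 2:
--         return [(0, length)] if length > 0 else []
--
--     # Single left-to-right sweep over the boundaries with a stack of committed
--     # boundaries; after a merge only the current span needs re-checking, because
--     # every span already on the stack is >= min_patch_size.
--     out = [0]
--     i = 1
--     n = len(bs)
--     while i < n:
--         b = bs[i]
--         if b - out[-1] >= min_patch_size:
--             out.append(b)
--             i += 1
--             continue
--         can_left = len(out) > 1
--         can_right = i + 1 < n
--         if can_left and can_right:
--             if out[-1] - out[-2] <= bs[i + 1] - b: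
--                 out.pop()      # merge small span with its left neighbor
--             else:
--                 i += 1         # merge small span with its right neighbor
--         elif can_left:
--             out.pop()
--         elif can_right:
--             i += 1
--         else:
--             out.append(b)      # lone small span: nothing can be merged
--             i += 1
--     return [(s, e) for s, e in zip(out, out[1:]) if e > s]
-- ===== Notes on version B (the rewrite author's own statement) =====
-- stated objective: faster
-- what changed: A repeatedly rescans the whole boundary list from the start (recomputing all span lengths, finding the first sub-min span, deleting one boundary, and restarting); B sorts once and does a single left-to-right sweep keeping a stack of committed boundaries, re-checking only the current span locally after each pop/skip merge.
import Mathlib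
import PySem

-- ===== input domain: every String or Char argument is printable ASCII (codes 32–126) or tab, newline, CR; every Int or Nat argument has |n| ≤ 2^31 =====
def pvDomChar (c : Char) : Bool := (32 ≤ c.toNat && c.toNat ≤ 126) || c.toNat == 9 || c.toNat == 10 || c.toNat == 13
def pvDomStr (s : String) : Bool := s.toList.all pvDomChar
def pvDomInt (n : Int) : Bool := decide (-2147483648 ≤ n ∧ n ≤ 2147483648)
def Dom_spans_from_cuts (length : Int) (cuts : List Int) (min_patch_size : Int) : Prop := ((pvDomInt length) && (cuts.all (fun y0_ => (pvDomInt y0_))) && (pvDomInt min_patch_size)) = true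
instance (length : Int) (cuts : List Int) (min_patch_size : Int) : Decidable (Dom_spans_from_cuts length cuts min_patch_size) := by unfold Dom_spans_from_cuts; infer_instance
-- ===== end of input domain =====

-- B replaces A's repeated full rescans of the boundary list (find first sub-min
-- span, delete one boundary, restart the scan) by a single left-to-right sweep
-- with a stack of committed boundaries and a local re-check after each merge;
-- the return values are proved identical on the whole domain.

-- ===== PORT A =====

-- 'lengths = [boundaries[i+1] - boundaries[i] for i in range(len(boundaries)-1)]'
def pvLensA (bs : List Int) : List Int :=
  (PySem.List.pyRange 0 ((bs.length : Int) - 1) 1).map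
    (fun i => PySem.List.pyGetD bs (i + 1) 0 - PySem.List.pyGetD bs i 0)

-- cited by loopA's decreasing_by
lemma pvLensA_length (bs : List Int) : (pvLensA bs).length = bs.length - 1 := by
  simp [pvLensA, PySem.List.length_pyRange_one]

-- cited by loopA's decreasing_by
lemma pv_findIdx?_lt (bs : List Int) (m : Int) (k : Nat)
    (h : (pvLensA bs).findIdx? (fun l => decide (l < m)) = some k) :
    k + 1 < bs.length := by
  have hk : k < (pvLensA bs).length := by
    by_contra hge
    have h2 := List.of_findIdx?_eq_some h
    rw [List.getElem?_eq_none (by omega)] at h2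
    exact absurd h2 (by simp)
  rw [pvLensA_length] at hk
  omega

-- A's 'while True' loop: rescan for the first sub-min span ('small_idx'),
-- delete one boundary, repeat (recursion on the shrinking boundary list).
def loopA (m : Int) (bs : List Int) : List Int :=
  match hf : (pvLensA bs).findIdx? (fun l => decide (l < m)) with
  | none => bs
  | some k =>
    if bs.length ≤ 2 then bs
    else if ¬ 0 < k ∧ ¬ k + 1 < bs.length - 1 then bs
    else
      if (if 0 < k ∧ k + 1 < bs.length - 1 then
            decide (PySem.List.pyGetD bs (k : Int) 0 - PySem.List.pyGetD bs ((k : Int) - 1) 0 ≤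
                    PySem.List.pyGetD bs ((k : Int) + 2) 0 - PySem.List.pyGetD bs ((k : Int) + 1) 0)
          else decide (0 < k))
      then loopA m (bs.eraseIdx k) else loopA m (bs.eraseIdx (k + 1))
termination_by bs.length
decreasing_by
  · have := pv_findIdx?_lt bs m k hf
    rw [List.length_eraseIdx]
    split <;> omega
  · have := pv_findIdx?_lt bs m k hf
    rw [List.length_eraseIdx]
    split <;> omega

-- the final 'for i in range(len(boundaries)-1): … if e > s: spans.append((s, e))'
def pvBuildA (bs : List Int) : List (Int × Int) :=
  (PySem.List.pyRange 0 ((bs.length : Int) - 1) 1).foldl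
    (fun spans i =>
      if PySem.List.pyGetD bs (i + 1) 0 > PySem.List.pyGetD bs i 0 then
        spans ++ [(PySem.List.pyGetD bs i 0, PySem.List.pyGetD bs (i + 1) 0)]
      else spans) []

def spans_from_cuts (length : Int) (cuts : List Int) (min_patch_size : Int) : List (Int × Int) :=
  let boundaries := [0] ++
    PySem.List.sorted (PySem.Set.ofList (cuts.filter (fun c => decide (0 < c) && decide (c < length)))) (fun x => x) false
    ++ [length]
  if boundaries.length ≤ 2 then (if 0 < length then [(0, length)] else [])
  else pvBuildA (loopA min_patch_size boundaries)

-- ===== PORT B =====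

-- B's single sweep: 'out' is the stack of committed boundaries, 'rest' the
-- boundaries not yet reached (bs[i:]); pop = merge left, skip = merge right.
def loopB (m : Int) (out rest : List Int) : List Int :=
  match rest with
  | [] => out
  | b :: rest' =>
    if m ≤ b - PySem.List.pyGetD out (-1) 0 then loopB m (out ++ [b]) rest'
    else if _hb : 1 < out.length ∧ rest' ≠ [] then
      if PySem.List.pyGetD out (-1) 0 - PySem.List.pyGetD out (-2) 0 ≤
         PySem.List.pyGetD rest' 0 0 - b
      then loopB m out.dropLast (b :: rest')
      else loopB m out rest'
    else if _hl : 1 < out.length then loopB m out.dropLast (b :: rest')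
    else if rest' ≠ [] then loopB m out rest'
    else out ++ [b]
termination_by 2 * rest.length + out.length
decreasing_by
  all_goals simp [List.length_dropLast] <;> omega

def spans_from_cuts_alt (length : Int) (cuts : List Int) (min_patch_size : Int) : List (Int × Int) :=
  let bs := [0] ++
    PySem.List.sorted (PySem.Set.ofList (cuts.filter (fun c => decide (0 < c) && decide (c < length)))) (fun x => x) false
    ++ [length]
  if bs.length ≤ 2 then (if 0 < length then [(0, length)] else [])
  else
    let out := loopB min_patch_size [0] (bs.drop 1)
    (out.zip (out.drop 1)).filter (fun se => decide (se.1 < se.2))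

-- ===== PRECONDITION & SPEC =====
def Spec_spans_from_cuts (length : Int) (cuts : List Int) (min_patch_size : Int) (out : List (Int × Int)) : Prop := out = spans_from_cuts_alt length cuts min_patch_size
instance (length : Int) (cuts : List Int) (min_patch_size : Int) (out : List (Int × Int)) : Decidable (Spec_spans_from_cuts length cuts min_patch_size out) := by unfold Spec_spans_from_cuts; infer_instance

-- ===== CLAIM (what is proved, stated in full; the proofs are below) =====
def Claim_equal_spans_from_cuts : Prop := ∀ (length : Int) (cuts : List Int) (min_patch_size : Int), Dom_spans_from_cuts length cuts min_patch_size → Spec_spans_from_cuts length cuts min_patch_size (spans_from_cuts length cuts min_patch_size)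

-- ===== LEMMAS AND PROOFS =====

-- the list of consecutive differences, structurally
def pvDiffs : List Int → List Int
  | a :: b :: t => (b - a) :: pvDiffs (b :: t)
  | _ => []

lemma pvDiffs_length (l : List Int) : (pvDiffs l).length = l.length - 1 := by
  induction l with
  | nil => rfl
  | cons a t ih =>
    cases t with
    | nil => rfl
    | cons b t' => simp [pvDiffs] at *; omega

lemma pvDiffs_getElem (l : List Int) (i : Nat) (h : i < (pvDiffs l).length) :
    (pvDiffs l)[i] = l.getD (i + 1) 0 - l.getD i 0 := by
  induction l generalizing i with
  | nil => simp [pvDiffs] at h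
  | cons a t ih =>
    cases t with
    | nil => simp [pvDiffs] at h
    | cons b t' =>
      cases i with
      | zero => simp [pvDiffs]
      | succ j =>
        simp only [pvDiffs, List.getElem_cons_succ, List.getD_cons_succ]
        exact ih j (by simp [pvDiffs] at h ⊢; omega)

lemma pvLensA_eq (bs : List Int) : pvLensA bs = pvDiffs bs := by
  apply List.ext_getElem
  · rw [pvLensA_length, pvDiffs_length]
  · intro i h1 h2
    rw [pvDiffs_getElem _ _ h2]
    unfold pvLensA
    rw [List.getElem_map]
    rw [PySem.List.getElem_pyRange_one]
    have e1 : (0 : Int) + (i : Int) + 1 = ((i + 1 : Nat) : Int) := by push_cast; ring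
    have e2 : (0 : Int) + (i : Int) = ((i : Nat) : Int) := by ring
    rw [e1, e2, PySem.List.pyGetD_natCast, PySem.List.pyGetD_natCast]

lemma pyGetD_neg_one (o : List Int) (ho : o ≠ []) (d : Int) :
    PySem.List.pyGetD o (-1) d = o.getD (o.length - 1) d := by
  have hl : 0 < o.length := List.length_pos_iff.mpr ho
  unfold PySem.List.pyGetD PySem.List.pyGet? PySem.List.pyIdx?
  rw [if_neg (by omega), if_pos (by omega)]
  simp [List.getD_eq_getElem?_getD]

lemma pyGetD_neg_two (o : List Int) (ho : 1 < o.length) (d : Int) :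
    PySem.List.pyGetD o (-2) d = o.getD (o.length - 2) d := by
  unfold PySem.List.pyGetD PySem.List.pyGet? PySem.List.pyIdx?
  rw [if_neg (by omega), if_pos (by omega)]
  simp [List.getD_eq_getElem?_getD]

lemma pvDiffs_append (o : List Int) (x : Int) (r : List Int) (ho : o ≠ []) :
    pvDiffs (o ++ x :: r) =
      pvDiffs o ++ (x - PySem.List.pyGetD o (-1) 0) :: pvDiffs (x :: r) := by
  induction o with
  | nil => exact absurd rfl ho
  | cons a o' ih =>
    cases o' with
    | nil =>
      rw [pyGetD_neg_one _ (by simp) 0]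
      simp [pvDiffs]
    | cons c o'' =>
      have h1 := ih (by simp)
      rw [pyGetD_neg_one _ (by simp) 0] at h1
      rw [pyGetD_neg_one _ (by simp) 0]
      simp only [List.cons_append, pvDiffs] at h1 ⊢
      rw [h1]
      simp; rfl

lemma pv_zip_eq (bs : List Int) :
    (List.range (bs.length - 1)).map (fun k => (bs.getD k 0, bs.getD (k + 1) 0)) =
      bs.zip (bs.drop 1) := by
  apply List.ext_getElem
  · simp [List.length_zip]
  · intro i h1 h2
    simp only [List.getElem_map, List.getElem_range, List.getElem_zip, List.getElem_drop]
    simp only [List.length_map, List.length_range] at h1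
    rw [List.getD_eq_getElem _ _ (by omega), List.getD_eq_getElem _ _ (by omega)]
    simp [Nat.add_comm]

lemma pvGetD_cast_succ (bs : List Int) (y : Nat) :
    PySem.List.pyGetD bs ((y : Int) + 1) 0 = bs.getD (y + 1) 0 := by
  rw [show ((y : Int) + 1) = ((y + 1 : Nat) : Int) by push_cast; ring, PySem.List.pyGetD_natCast]

lemma pvBuild_eq (bs : List Int) :
    pvBuildA bs = (bs.zip (bs.drop 1)).filter (fun se => decide (se.1 < se.2)) := by
  unfold pvBuildA
  rw [PySem.List.pyRange_one, List.foldl_map]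
  simp only [zero_add, pvGetD_cast_succ, PySem.List.pyGetD_natCast]
  have hfold := PySem.List.foldl_append_ite
    (p := fun (k : Nat) => bs.getD (k + 1) 0 > bs.getD k 0)
    (f := fun (k : Nat) => (bs.getD k 0, bs.getD (k + 1) 0))
    (l := List.range (((bs.length : Int) - 1 - 0).toNat))
    (acc := ([] : List (Int × Int)))
  rw [hfold, show (((bs.length : Int) - 1 - 0).toNat) = bs.length - 1 by omega,
    ← pv_zip_eq, List.filter_map]
  rw [List.nil_append]
  congr 1

-- one-step unfoldings of loopB
lemma loopB_nil (m : Int) (out : List Int) : loopB m out [] = out := by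
  rw [loopB.eq_def]

lemma loopB_cons (m : Int) (out : List Int) (b : Int) (rest' : List Int) :
    loopB m out (b :: rest') =
      if m ≤ b - PySem.List.pyGetD out (-1) 0 then loopB m (out ++ [b]) rest'
      else if _hb : 1 < out.length ∧ rest' ≠ [] then
        if PySem.List.pyGetD out (-1) 0 - PySem.List.pyGetD out (-2) 0 ≤
           PySem.List.pyGetD rest' 0 0 - b
        then loopB m out.dropLast (b :: rest')
        else loopB m out rest'
      else if _hl : 1 < out.length then loopB m out.dropLast (b :: rest')
      else if rest' ≠ [] then loopB m out rest'
      else out ++ [b] := by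
  rw [loopB.eq_def]

-- index and deletion arithmetic at the junction of 'out' and the unread tail
lemma pvGet_k (out : List Int) (b : Int) (r : List Int) (hout : out ≠ []) :
    PySem.List.pyGetD (out ++ b :: r) ((out.length - 1 : Nat) : Int) 0 =
      PySem.List.pyGetD out (-1) 0 := by
  have hp : 0 < out.length := List.length_pos_iff.mpr hout
  rw [PySem.List.pyGetD_natCast, pyGetD_neg_one out hout, List.getD_append _ _ _ _ (by omega)]

lemma pvGet_km1 (out : List Int) (b : Int) (r : List Int) (hp : 1 < out.length) :
    PySem.List.pyGetD (out ++ b :: r) (((out.length - 1 : Nat) : Int) - 1) 0 =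
      PySem.List.pyGetD out (-2) 0 := by
  have e : ((out.length - 1 : Nat) : Int) - 1 = ((out.length - 2 : Nat) : Int) := by omega
  rw [e, PySem.List.pyGetD_natCast, pyGetD_neg_two out hp, List.getD_append _ _ _ _ (by omega)]

lemma pvGet_kp1 (out : List Int) (b : Int) (r : List Int) (hout : out ≠ []) :
    PySem.List.pyGetD (out ++ b :: r) (((out.length - 1 : Nat) : Int) + 1) 0 = b := by
  have hp : 0 < out.length := List.length_pos_iff.mpr hout
  have e : ((out.length - 1 : Nat) : Int) + 1 = ((out.length : Nat) : Int) := by omega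
  rw [e, PySem.List.pyGetD_natCast, List.getD_append_right _ _ _ _ (le_refl _)]
  simp

lemma pvGet_kp2 (out : List Int) (b : Int) (r : List Int) (hout : out ≠ []) :
    PySem.List.pyGetD (out ++ b :: r) (((out.length - 1 : Nat) : Int) + 2) 0 = r.getD 0 0 := by
  have hp : 0 < out.length := List.length_pos_iff.mpr hout
  have e : ((out.length - 1 : Nat) : Int) + 2 = ((out.length + 1 : Nat) : Int) := by omega
  rw [e, PySem.List.pyGetD_natCast, List.getD_append_right _ _ _ _ (by omega)]
  simp

lemma pvErase_k (out : List Int) (b : Int) (r : List Int) (hout : out ≠ []) :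
    (out ++ b :: r).eraseIdx (out.length - 1) = out.dropLast ++ b :: r := by
  have hp : 0 < out.length := List.length_pos_iff.mpr hout
  rw [List.eraseIdx_append_of_lt_length (by omega), List.eraseIdx_length_sub_one]

lemma pvErase_kp1 (out : List Int) (b : Int) (r : List Int) (hout : out ≠ []) :
    (out ++ b :: r).eraseIdx (out.length - 1 + 1) = out ++ r := by
  have hp : 0 < out.length := List.length_pos_iff.mpr hout
  have e : out.length - 1 + 1 = out.length := by omega
  rw [e, List.eraseIdx_append_of_length_le (le_refl _)]
  simp

-- every span already committed on the stack stays ≥ m after a pop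
lemma pvAll_dropLast (m : Int) (out : List Int)
    (hall : ∀ d ∈ pvDiffs out, m ≤ d) :
    ∀ d ∈ pvDiffs out.dropLast, m ≤ d := by
  intro d hd
  by_cases h0 : out.dropLast = []
  · rw [h0] at hd; simp [pvDiffs] at hd
  · have hout : out ≠ [] := by intro h; rw [h] at h0; exact h0 rfl
    apply hall
    rw [← List.dropLast_concat_getLast hout, pvDiffs_append _ _ _ h0]
    simp [hd]

theorem pvLoop_eq (m : Int) (out rest : List Int) (hout : out ≠ [])
    (hall : ∀ d ∈ pvDiffs out, m ≤ d) :
    loopA m (out ++ rest) = loopB m out rest := by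
  have hp0 : 0 < out.length := List.length_pos_iff.mpr hout
  cases rest with
  | nil =>
    rw [List.append_nil, loopB_nil, loopA.eq_def]
    have hnone : (pvLensA out).findIdx? (fun l => decide (l < m)) = none := by
      rw [pvLensA_eq, List.findIdx?_eq_none_iff]
      intro d hd
      simpa using not_lt.mpr (hall d hd)
    split
    · rfl
    · next k heq => simp [hnone] at heq
  | cons b rest' =>
    by_cases hc : m ≤ b - PySem.List.pyGetD out (-1) 0
    · rw [loopB_cons, if_pos hc, show out ++ b :: rest' = (out ++ [b]) ++ rest' by simp]
      refine pvLoop_eq m (out ++ [b]) rest' (by simp) ?_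
      intro d hd
      rw [pvDiffs_append out b [] hout] at hd
      simp only [List.mem_append, List.mem_cons] at hd
      rcases hd with h | h | h
      · exact hall d h
      · omega
      · simp [pvDiffs] at h
    · have hfind : (pvLensA (out ++ b :: rest')).findIdx? (fun l => decide (l < m))
          = some (out.length - 1) := by
        rw [pvLensA_eq, pvDiffs_append out b rest' hout, List.findIdx?_append]
        have h1 : (pvDiffs out).findIdx? (fun l => decide (l < m)) = none := by
          rw [List.findIdx?_eq_none_iff]
          intro d hd
          simpa using not_lt.mpr (hall d hd)
        rw [h1, List.findIdx?_cons, if_pos (by simp; omega)]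
        simp [pvDiffs_length]
      rw [loopB_cons, if_neg hc, loopA.eq_def]
      split
      · next heq => simp [hfind] at heq
      · next k heq =>
        rw [hfind] at heq
        injection heq with hk
        subst hk
        by_cases hp : 1 < out.length
        · by_cases hr : rest' ≠ []
          · -- both neighbours available: A compares the two neighbour spans
            have hrlen : 0 < rest'.length := List.length_pos_iff.mpr hr
            have hL2 : ¬ ((out ++ b :: rest').length ≤ 2) := by
              simp only [List.length_append, List.length_cons]; omega
            have hG : ¬ (¬ 0 < out.length - 1 ∧
                ¬ out.length - 1 + 1 < (out ++ b :: rest').length - 1) :=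
              fun h => h.1 (by omega)
            have hIn : 0 < out.length - 1 ∧
                out.length - 1 + 1 < (out ++ b :: rest').length - 1 := by
              refine ⟨by omega, ?_⟩
              simp only [List.length_append, List.length_cons]; omega
            rw [if_neg hL2, if_neg hG, if_pos hIn]
            rw [pvGet_k out b rest' hout, pvGet_km1 out b rest' hp, pvGet_kp1 out b rest' hout,
              pvGet_kp2 out b rest' hout, dif_pos ⟨hp, hr⟩, PySem.List.pyGetD_ofNat']
            by_cases hcmp : PySem.List.pyGetD out (-1) 0 - PySem.List.pyGetD out (-2) 0 ≤
                rest'.getD 0 0 - b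
            · rw [if_pos (decide_eq_true hcmp), if_pos hcmp, pvErase_k out b rest' hout]
              exact pvLoop_eq m out.dropLast (b :: rest')
                (by rw [← List.length_pos_iff, List.length_dropLast]; omega)
                (pvAll_dropLast m out hall)
            · have hd : ¬ (decide (PySem.List.pyGetD out (-1) 0 - PySem.List.pyGetD out (-2) 0 ≤
                  rest'.getD 0 0 - b) = true) := by simpa using hcmp
              rw [if_neg hd, if_neg hcmp, pvErase_kp1 out b rest' hout]
              exact pvLoop_eq m out rest' hout hall
          · -- only the left neighbour: A removes the left boundary (pop)
            have hre : rest' = [] := by simpa using hr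
            subst hre
            have hL2 : ¬ ((out ++ [b]).length ≤ 2) := by
              simp only [List.length_append, List.length_cons, List.length_nil]; omega
            have hG : ¬ (¬ 0 < out.length - 1 ∧
                ¬ out.length - 1 + 1 < (out ++ [b]).length - 1) :=
              fun h => h.1 (by omega)
            have hIn : ¬ (0 < out.length - 1 ∧
                out.length - 1 + 1 < (out ++ [b]).length - 1) := fun h => by
              have := h.2
              simp only [List.length_append, List.length_cons, List.length_nil] at this
              omega
            have hML : decide (0 < out.length - 1) = true := decide_eq_true (by omega)
            rw [if_neg hL2, if_neg hG, if_neg hIn, if_pos hML, pvErase_k out b [] hout]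
            rw [dif_neg (by simp), dif_pos hp]
            exact pvLoop_eq m out.dropLast [b]
              (by rw [← List.length_pos_iff, List.length_dropLast]; omega)
              (pvAll_dropLast m out hall)
        · by_cases hr : rest' ≠ []
          · -- only the right neighbour: A removes the right boundary (skip)
            have hrlen : 0 < rest'.length := List.length_pos_iff.mpr hr
            have hL2 : ¬ ((out ++ b :: rest').length ≤ 2) := by
              simp only [List.length_append, List.length_cons]; omega
            have hG : ¬ (¬ 0 < out.length - 1 ∧
                ¬ out.length - 1 + 1 < (out ++ b :: rest').length - 1) :=
              fun h => h.2 (by simp only [List.length_append, List.length_cons]; omega)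
            have hIn : ¬ (0 < out.length - 1 ∧
                out.length - 1 + 1 < (out ++ b :: rest').length - 1) :=
              fun h => by have := h.1; omega
            have hML : ¬ (decide (0 < out.length - 1) = true) := by simp; omega
            rw [if_neg hL2, if_neg hG, if_neg hIn, if_neg hML, pvErase_kp1 out b rest' hout]
            rw [dif_neg (fun h => hp h.1), dif_neg hp, if_pos hr]
            exact pvLoop_eq m out rest' hout hall
          · -- lone small span: both break / commit it unchanged
            have hre : rest' = [] := by simpa using hr
            subst hre
            have hL2 : (out ++ [b]).length ≤ 2 := by
              simp only [List.length_append, List.length_cons, List.length_nil]; omega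
            rw [if_pos hL2, dif_neg (fun h => hp h.1), dif_neg hp, if_neg (by simp)]
termination_by 2 * rest.length + out.length
decreasing_by
  all_goals simp [List.length_dropLast] <;> omega

-- ===== VERDICT (by name: the statement is the Claim_ definition above) =====
theorem spans_from_cuts_spec : Claim_equal_spans_from_cuts := by
  intro L cuts m _
  unfold Spec_spans_from_cuts spans_from_cuts spans_from_cuts_alt
  set S := PySem.List.sorted (PySem.Set.ofList
    (cuts.filter (fun c => decide (0 < c) && decide (c < L)))) (fun x => x) false with hS
  simp only []
  split
  · rfl
  · rw [pvBuild_eq]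
    have hassoc : [(0 : Int)] ++ S ++ [L] = [(0 : Int)] ++ (S ++ [L]) := by
      rw [List.append_assoc]
    rw [hassoc]
    rw [show (([(0 : Int)] ++ (S ++ [L])).drop 1) = S ++ [L] from rfl]
    rw [pvLoop_eq m [0] (S ++ [L]) (by simp) (by intro d hd; simp [pvDiffs] at hd)]
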